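-- pv_equiv track=rewrite | github.com/superobserver/Conversations | chain_counts1.py | get_operators
-- ===== SOURCE A (Python) =====
-- ALL_CLASSES = [1, 7, 11, 13, 17, 19, 23, 29, 31, 37, 41, 43, 47, 49, 53, 59, 61, 67, 71, 73, 77, 79, 83, 89]
--
-- def get_operators(k):
--     operators = []
--     seen = set()
--     for z in ALL_CLASSES:
--         try:
--             o = (k * pow(z, -1, 90)) % 90
--             if o not in ALL_CLASSES: continue
--             pair = tuple(sorted([z, o]))
--             if pair in seen: continue
--             seen.add(pair)
--             z_eff = 91 if z == 1 else z
--             o_eff = 91 if o == 1 else o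
--             l = 180 - (z_eff + o_eff)
--             m = 90 - (z_eff + o_eff) + (z_eff * o_eff - k) // 90
--             operators.append((l, m, z_eff))
--             if z != o:
--                 operators.append((l, m, o_eff))
--         except ValueError:
--             continue
--     return operators
-- ===== SOURCE B (Python) =====
-- ALL_CLASSES = [1, 7, 11, 13, 17, 19, 23, 29, 31, 37, 41, 43, 47, 49, 53, 59, 61, 67, 71, 73, 77, 79, 83, 89]
--
-- def get_operators(k):
--     # No modular inverse and no seen-set: enumerate unordered pairs (z, w), z <= w, of
--     # classes directly and keep those whose product is congruent to k mod 90. Each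
--     # unordered pair appears exactly once by construction (at its smaller element),
--     # which is where A's seen-set accepts it too.
--     r = k % 90
--     operators = []
--     for i in range(len(ALL_CLASSES)):
--         z = ALL_CLASSES[i]
--         for w in ALL_CLASSES[i:]:
--             if z * w % 90 == r:
--                 z_eff = 91 if z == 1 else z
--                 w_eff = 91 if w == 1 else w
--                 l = 180 - (z_eff + w_eff)
--                 m = 90 - (z_eff + w_eff) + (z_eff * w_eff - k) // 90
--                 operators.append((l, m, z_eff))
--                 if z != w:
--                     operators.append((l, m, w_eff))
--                 break
--     return operators
-- ===== Notes on version B (the rewrite author's own statement) =====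
-- stated objective: alternative
-- what changed: Drops the modular-inverse computation (pow(z,-1,90)), the membership test and the seen-set entirely: B enumerates unordered pairs (z, w) with z <= w from the class list and keeps exactly those whose product is congruent to k mod 90, so deduplication is structural (each pair is visited once) and the inverse is never computed.
import Mathlib
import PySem

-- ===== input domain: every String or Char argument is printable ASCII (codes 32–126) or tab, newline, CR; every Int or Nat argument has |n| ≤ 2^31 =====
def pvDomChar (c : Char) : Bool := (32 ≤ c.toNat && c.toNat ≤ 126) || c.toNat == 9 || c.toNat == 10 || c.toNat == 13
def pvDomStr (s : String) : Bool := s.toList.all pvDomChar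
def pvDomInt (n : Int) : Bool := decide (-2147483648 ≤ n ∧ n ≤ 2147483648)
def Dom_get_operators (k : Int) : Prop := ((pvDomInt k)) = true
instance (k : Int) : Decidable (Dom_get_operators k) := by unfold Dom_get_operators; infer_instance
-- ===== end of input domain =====

-- B replaces A's modular-inverse + seen-set scheme with a direct enumeration of unordered pairs
-- (z, w), z <= w, whose product is k mod 90 (an alternative algorithm of similar cost).


-- ===== PORT A =====
def allClasses : List Int := [1, 7, 11, 13, 17, 19, 23, 29, 31, 37, 41, 43, 47, 49, 53, 59, 61, 67, 71, 73, 77, 79, 83, 89]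

-- hand port of pow(z, -1, 90): the unique t ∈ [0,90) with z*t ≡ 1 (mod 90); exact for every z
-- coprime to 90 (all elements of allClasses, the only arguments it receives here); Python raises
-- ValueError otherwise — the getD default is unreachable on those arguments.
def inv90 (z : Int) : Int := ((PySem.List.pyRange 0 90 1).find? (fun t => z * t % 90 == 1)).getD 0

-- the loop of A: state = (operators, seen); Python's `%` with positive modulus 90 = Lean's `%` on Int
def goA (k : Int) : List Int → List (Int × Int × Int) → PySem.Set (Int × Int) → List (Int × Int × Int)
  | [], ops, _ => ops
  | z :: rest, ops, seen =>
    let o := k * inv90 z % 90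
    if o ∉ allClasses then goA k rest ops seen
    else
      let pair := if z ≤ o then (z, o) else (o, z)   -- tuple(sorted([z, o]))
      if pair ∈ seen then goA k rest ops seen
      else
        let zEff := if z = 1 then 91 else z
        let oEff := if o = 1 then 91 else o
        let l := 180 - (zEff + oEff)
        let m := 90 - (zEff + oEff) + PySem.Int.floordiv (zEff * oEff - k) 90
        let ops1 := ops ++ [(l, m, zEff)]
        let ops2 := if z ≠ o then ops1 ++ [(l, m, oEff)] else ops1
        goA k rest ops2 (PySem.Set.add seen pair)

def get_operators (k : Int) : List (Int × Int × Int) := goA k allClasses [] PySem.Set.empty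

-- ===== PORT B =====
-- B's inner loop over ALL_CLASSES[i:] (which starts at z itself): first w with z*w % 90 == r
-- yields the one or two operators and breaks (returning here = Python's break).
def innerB (k r z : Int) : List Int → List (Int × Int × Int)
  | [] => []
  | w :: rest =>
    if z * w % 90 == r then
      let zEff := if z = 1 then 91 else z
      let wEff := if w = 1 then 91 else w
      let l := 180 - (zEff + wEff)
      let m := 90 - (zEff + wEff) + PySem.Int.floordiv (zEff * wEff - k) 90
      (l, m, zEff) :: (if z ≠ w then [(l, m, wEff)] else [])
    else innerB k r z rest

-- B's outer loop: index i over the list = recursion over its tails (z :: rest is ALL_CLASSES[i:])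
def goB (k r : Int) : List Int → List (Int × Int × Int)
  | [] => []
  | z :: rest => innerB k r z (z :: rest) ++ goB k r rest

def get_operators_alt (k : Int) : List (Int × Int × Int) := goB k (k % 90) allClasses

-- ===== PRECONDITION & SPEC =====
def Spec_get_operators (k : Int) (out : List (Int × Int × Int)) : Prop := out = get_operators_alt k
instance (k : Int) (out : List (Int × Int × Int)) : Decidable (Spec_get_operators k out) := by unfold Spec_get_operators; infer_instance

-- ===== CLAIM (what is proved, stated in full; the proofs are below) =====
def Claim_equal_get_operators : Prop := ∀ (k : Int), Dom_get_operators k → Spec_get_operators k (get_operators k)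

-- ===== LEMMAS AND PROOFS =====

-- the one-or-two operators emitted for an accepted pair (z, o)
def emitPair (k : Int) (p : Int × Int) : List (Int × Int × Int) :=
  let zEff := if p.1 = 1 then 91 else p.1
  let oEff := if p.2 = 1 then 91 else p.2
  let l := 180 - (zEff + oEff)
  let m := 90 - (zEff + oEff) + PySem.Int.floordiv (zEff * oEff - k) 90
  (l, m, zEff) :: (if p.1 ≠ p.2 then [(l, m, oEff)] else [])

-- residue-level shadow of A's loop: the accepted (z, o) pairs depend only on k % 90
def shA (r : Int) : List Int → PySem.Set (Int × Int) → List (Int × Int)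
  | [], _ => []
  | z :: rest, seen =>
    let o := r * inv90 z % 90
    if o ∉ allClasses then shA r rest seen
    else
      let pair := if z ≤ o then (z, o) else (o, z)
      if pair ∈ seen then shA r rest seen
      else (z, o) :: shA r rest (PySem.Set.add seen pair)

-- residue-level shadow of B's inner loop: the partner w, if any
def innerSh (r z : Int) : List Int → Option Int
  | [] => none
  | w :: rest => if z * w % 90 == r then some w else innerSh r z rest

-- residue-level shadow of B's outer loop: the accepted (z, w) pairs
def shB (r : Int) : List Int → List (Int × Int)
  | [] => []
  | z :: rest =>
    (match innerSh r z (z :: rest) with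
     | some w => [(z, w)]
     | none => []) ++ shB r rest

lemma mul_emod_reduce (k i : Int) : k * i % 90 = k % 90 * i % 90 := by
  conv_lhs => rw [Int.mul_emod]
  conv_rhs => rw [Int.mul_emod, Int.emod_emod_of_dvd k (dvd_refl 90)]

lemma goA_eq_shadow (k : Int) (L : List Int) (ops : List (Int × Int × Int))
    (seen : PySem.Set (Int × Int)) :
    goA k L ops seen = ops ++ (shA (k % 90) L seen).flatMap (emitPair k) := by
  induction L generalizing ops seen with
  | nil => simp [goA, shA]
  | cons z rest ih =>
    simp only [goA, shA, mul_emod_reduce k (inv90 z)]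
    split
    · exact ih ops seen
    · split <;> split
      · exact ih ops seen
      · rw [ih, List.flatMap_cons]
        by_cases h4 : z = k % 90 * inv90 z % 90
        · simp only [emitPair, ne_eq, if_neg (not_not_intro h4), List.cons_append,
            List.nil_append, List.append_assoc]
        · simp only [emitPair, ne_eq, if_pos h4, List.cons_append,
            List.nil_append, List.append_assoc]
      · exact ih ops seen
      · rw [ih, List.flatMap_cons]
        have h4 : z ≠ k % 90 * inv90 z % 90 := by omega
        simp only [emitPair, ne_eq, if_pos h4, List.cons_append,
          List.nil_append, List.append_assoc]

lemma innerB_eq_shadow (k r z : Int) (L : List Int) :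
    innerB k r z L = (match innerSh r z L with
                      | some w => emitPair k (z, w)
                      | none => []) := by
  induction L with
  | nil => simp [innerB, innerSh]
  | cons w rest ih =>
    simp only [innerB, innerSh]
    split
    · rfl
    · exact ih

lemma goB_eq_shadow (k r : Int) (L : List Int) :
    goB k r L = (shB r L).flatMap (emitPair k) := by
  induction L with
  | nil => simp [goB, shB]
  | cons z rest ih =>
    simp only [goB, shB, innerB_eq_shadow, ih]
    cases innerSh r z (z :: rest) <;> simp

-- the decided core: for every residue r ∈ [0,90), A's accepted pairs = B's accepted pairs
lemma shadow_core : ∀ n : Nat, n < 90 →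
    shA (n : Int) allClasses PySem.Set.empty = shB (n : Int) allClasses := by
  decide

theorem get_operators_spec : Claim_equal_get_operators := by
  intro k _
  show get_operators k = get_operators_alt k
  have h0 : (0 : Int) ≤ k % 90 := Int.emod_nonneg k (by norm_num)
  have h90 : k % 90 < 90 := Int.emod_lt_of_pos k (by norm_num)
  have hn : ((k % 90).toNat : Int) = k % 90 := Int.toNat_of_nonneg h0
  have hcore := shadow_core (k % 90).toNat (by omega)
  rw [hn] at hcore
  rw [get_operators, get_operators_alt, goA_eq_shadow, goB_eq_shadow, hcore]
  simp
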